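-- pv_equiv track=rewrite | github.com/hiroytakad/docusign-webhook | main.py | number_to_japanese_units
-- ===== SOURCE A (Python) =====
-- def number_to_japanese_units(n):
--     if n < 1000:
--         return str(n)
--     elif n < 10000:
--         return str(n)
--     units = ["", "万", "億", "兆", "京"]
--     num_str = str(n)
--     result = []
--     unit_index = 0
--     while num_str:
--         section = num_str[-4:]
--         num_str = num_str[:-4]
--         section_val = int(section)
--         if section_val != 0:
--             result.insert(0, str(section_val) + units[unit_index])
--         unit_index += 1
--     return "".join(result)
-- ===== SOURCE B (Python) =====
-- def number_to_japanese_units(n):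
--     if n < 10000:
--         return str(n)
--     sections = []
--     while n > 0:
--         n, r = divmod(n, 10000)
--         sections.append(r)
--     units = ["", "万", "億", "兆", "京"]
--     parts = []
--     idx = len(sections) - 1
--     for val in reversed(sections):
--         if val != 0:
--             parts.append(str(val) + units[idx])
--         idx -= 1
--     return "".join(parts)
-- ===== Notes on version B (the rewrite author's own statement) =====
-- stated objective: alternative
-- what changed: Sections are extracted arithmetically with divmod by the myriad base instead of slicing four characters at a time off the decimal string, and the output list is built by appending in most-significant-first order over the reversed section list instead of insert(0, ...) per slice.
import Mathlib
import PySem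

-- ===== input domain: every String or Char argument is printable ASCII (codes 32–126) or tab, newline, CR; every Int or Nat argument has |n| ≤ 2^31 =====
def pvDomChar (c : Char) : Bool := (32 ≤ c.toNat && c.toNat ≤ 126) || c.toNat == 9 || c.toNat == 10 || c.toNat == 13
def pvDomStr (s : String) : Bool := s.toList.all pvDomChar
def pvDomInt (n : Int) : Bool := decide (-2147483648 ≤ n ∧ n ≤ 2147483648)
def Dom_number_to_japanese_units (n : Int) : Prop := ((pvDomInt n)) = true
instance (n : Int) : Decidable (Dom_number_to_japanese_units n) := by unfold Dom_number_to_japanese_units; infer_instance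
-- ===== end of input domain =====

-- B extracts the 4-digit sections arithmetically (divmod by 10000) and renders them
-- most-significant-first over the reversed section list, instead of A's string slicing with insert(0, ...).

-- ===== PORT A =====
def jpUnitsA : List String := ["", "万", "億", "兆", "京"]

-- A's 'while num_str:' loop; state = (num_str, result, unit_index)
def jpALoop (numStr : List Char) (result : List String) (unitIndex : Nat) : List String :=
  if h : numStr = [] then result
  else
    let section_ := PySem.List.slice numStr (some (-4)) none          -- num_str[-4:]
    let numStr' := PySem.List.slice numStr none (some (-4))           -- num_str[:-4]
    let sectionVal := (PySem.Int.ofChars? section_).getD 0            -- int(section); never none on a digit string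
    let result' := if sectionVal ≠ 0
      then (PySem.Int.toStr sectionVal ++ PySem.List.pyGetD jpUnitsA (unitIndex : Int) "") :: result
      else result
    jpALoop numStr' result' (unitIndex + 1)
termination_by numStr.length
decreasing_by
  rw [PySem.List.slice_to_neg_ofNat numStr 4 (by omega)]
  have hlen : 0 < numStr.length := List.length_pos_iff.mpr h
  simp [List.length_take]
  omega

def number_to_japanese_units (n : Int) : String :=
  if n < 1000 then PySem.Int.toStr n
  else if n < 10000 then PySem.Int.toStr n
  else PySem.Str.join "" (jpALoop (PySem.Int.toChars n) [] 0)

-- ===== PORT B =====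
def jpUnitsB : List String := ["", "万", "億", "兆", "京"]

-- B's 'while n > 0: n, r = divmod(n, 10000); sections.append(r)' loop
def jpBSections (n : Int) (sections : List Int) : List Int :=
  if _h : 0 < n then
    jpBSections (PySem.Int.floordiv n 10000) (sections ++ [PySem.Int.mod n 10000])
  else sections
termination_by n.toNat
decreasing_by
  rw [PySem.Int.floordiv_eq_ediv_of_pos (by omega)]
  omega

-- B's 'for val in reversed(sections)' loop; state = (parts, idx)
def jpBParts (vals : List Int) (parts : List String) (idx : Int) : List String × Int :=
  match vals with
  | [] => (parts, idx)
  | v :: rest =>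
      jpBParts rest
        (if v ≠ 0 then parts ++ [PySem.Int.toStr v ++ PySem.List.pyGetD jpUnitsB idx ""] else parts)
        (idx - 1)

def number_to_japanese_units_alt (n : Int) : String :=
  if n < 10000 then PySem.Int.toStr n
  else
    let sections := jpBSections n []
    PySem.Str.join "" (jpBParts sections.reverse [] (PySem.List.len sections - 1)).1

-- ===== PRECONDITION & SPEC =====
def Spec_number_to_japanese_units (n : Int) (out : String) : Prop := out = number_to_japanese_units_alt n
instance (n : Int) (out : String) : Decidable (Spec_number_to_japanese_units n out) := by unfold Spec_number_to_japanese_units; infer_instance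

-- ===== CLAIM (what is proved, stated in full; the proofs are below) =====
def Claim_equal_number_to_japanese_units : Prop := ∀ (n : Int), Dom_number_to_japanese_units n → Spec_number_to_japanese_units n (number_to_japanese_units n)

-- ===== LEMMAS AND PROOFS =====

-- canonical decimal digit characters of n (no sign, no padding)
def jpRep (n : Nat) : List Char :=
  if _h : n < 10 then [Nat.digitChar n] else jpRep (n / 10) ++ [Nat.digitChar (n % 10)]
termination_by n
decreasing_by exact Nat.div_lt_self (by omega) (by omega)

-- zero-padded fixed-width digit blocks
def jpPad1 (k : Nat) : List Char := [Nat.digitChar (k % 10)]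
def jpPad2 (k : Nat) : List Char := [Nat.digitChar (k/10 % 10), Nat.digitChar (k % 10)]
def jpPad3 (k : Nat) : List Char := [Nat.digitChar (k/100 % 10), Nat.digitChar (k/10 % 10), Nat.digitChar (k % 10)]
def jpPad4 (k : Nat) : List Char := [Nat.digitChar (k/1000 % 10), Nat.digitChar (k/100 % 10), Nat.digitChar (k/10 % 10), Nat.digitChar (k % 10)]

-- 4-digit sections of m, least significant first
def jpSecs (m : Nat) : List Nat :=
  if _h : m = 0 then [] else (m % 10000) :: jpSecs (m / 10000)
termination_by m
decreasing_by exact Nat.div_lt_self (by omega) (by omega)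

-- rendered parts of m, most significant first, the least significant section wearing unit index idx
def jpRender (m idx : Nat) : List String :=
  if _h : m = 0 then []
  else jpRender (m / 10000) (idx + 1) ++
    (if m % 10000 ≠ 0 then [PySem.Int.toStr ((m % 10000 : Nat) : Int) ++ jpUnitsA.getD idx ""] else [])
termination_by m
decreasing_by exact Nat.div_lt_self (by omega) (by omega)

theorem jpRender_zero (idx : Nat) : jpRender 0 idx = [] := by
  rw [jpRender]; simp

theorem jpRender_pos {m : Nat} (h : 0 < m) (idx : Nat) :
    jpRender m idx = jpRender (m / 10000) (idx + 1) ++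
      (if m % 10000 ≠ 0 then [PySem.Int.toStr ((m % 10000 : Nat) : Int) ++ jpUnitsA.getD idx ""] else []) := by
  conv_lhs => rw [jpRender]
  simp [Nat.pos_iff_ne_zero.mp h]

theorem jpSecs_cons {m : Nat} (h : 0 < m) :
    jpSecs m = (m % 10000) :: jpSecs (m / 10000) := by
  conv_lhs => rw [jpSecs]
  simp [Nat.pos_iff_ne_zero.mp h]

-- finite checkers for the int() parsing facts, one nest per digit width
-- (the innermost argument varies the last digit; base carries the value of the fixed prefix)
def jpChkD (ca cb cc : Char) (base : Nat) : Nat → Bool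
  | 0 => true
  | d+1 => (PySem.Int.ofChars? [ca, cb, cc, Nat.digitChar d] == some ((base + d : Nat) : Int)) && jpChkD ca cb cc base d
def jpChkC (ca cb : Char) (base : Nat) : Nat → Bool
  | 0 => true
  | c+1 => jpChkD ca cb (Nat.digitChar c) (base + c * 10) 10 && jpChkC ca cb base c
def jpChkB (ca : Char) (base : Nat) : Nat → Bool
  | 0 => true
  | b+1 => jpChkC ca (Nat.digitChar b) (base + b * 100) 10 && jpChkB ca base b
def jpChkA : Nat → Bool
  | 0 => true
  | a+1 => jpChkB (Nat.digitChar a) (a * 1000) 10 && jpChkA a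

def jpChk3C (cb cc : Char) (base : Nat) : Nat → Bool
  | 0 => true
  | d+1 => (PySem.Int.ofChars? [cb, cc, Nat.digitChar d] == some ((base + d : Nat) : Int)) && jpChk3C cb cc base d
def jpChk3B (cb : Char) (base : Nat) : Nat → Bool
  | 0 => true
  | c+1 => jpChk3C cb (Nat.digitChar c) (base + c * 10) 10 && jpChk3B cb base c
def jpChk3A : Nat → Bool
  | 0 => true
  | b+1 => jpChk3B (Nat.digitChar b) (b * 100) 10 && jpChk3A b

def jpChk2B (cb : Char) (base : Nat) : Nat → Bool
  | 0 => true
  | d+1 => (PySem.Int.ofChars? [cb, Nat.digitChar d] == some ((base + d : Nat) : Int)) && jpChk2B cb base d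
def jpChk2A : Nat → Bool
  | 0 => true
  | c+1 => jpChk2B (Nat.digitChar c) (c * 10) 10 && jpChk2A c

def jpChk1 : Nat → Bool
  | 0 => true
  | d+1 => (PySem.Int.ofChars? [Nat.digitChar d] == some ((d : Nat) : Int)) && jpChk1 d

set_option maxRecDepth 10000 in
theorem jpChkA_true : jpChkA 10 = true := by decide
set_option maxRecDepth 10000 in
theorem jpChk3A_true : jpChk3A 10 = true := by decide
set_option maxRecDepth 10000 in
theorem jpChk2A_true : jpChk2A 10 = true := by decide
set_option maxRecDepth 10000 in
theorem jpChk1_true : jpChk1 10 = true := by decide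

theorem jpChkD_spec (ca cb cc : Char) (base : Nat) : ∀ n, jpChkD ca cb cc base n = true →
    ∀ d, d < n → PySem.Int.ofChars? [ca, cb, cc, Nat.digitChar d] = some ((base + d : Nat) : Int) := by
  intro n
  induction n with
  | zero => intro _ d hd; omega
  | succ n ih =>
      intro h d hd
      simp only [jpChkD, Bool.and_eq_true, beq_iff_eq] at h
      rcases Nat.lt_succ_iff_lt_or_eq.mp hd with h' | h'
      · exact ih (by simpa [jpChkD] using h.2) d h'
      · subst h'; exact h.1

theorem jpChkC_spec (ca cb : Char) (base : Nat) : ∀ n, jpChkC ca cb base n = true →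
    ∀ c, c < n → ∀ d, d < 10 →
      PySem.Int.ofChars? [ca, cb, Nat.digitChar c, Nat.digitChar d] = some ((base + c * 10 + d : Nat) : Int) := by
  intro n
  induction n with
  | zero => intro _ c hc; omega
  | succ n ih =>
      intro h c hc d hd
      simp only [jpChkC, Bool.and_eq_true] at h
      rcases Nat.lt_succ_iff_lt_or_eq.mp hc with h' | h'
      · exact ih h.2 c h' d hd
      · subst h'; exact jpChkD_spec ca cb _ _ 10 h.1 d hd

theorem jpChkB_spec (ca : Char) (base : Nat) : ∀ n, jpChkB ca base n = true →
    ∀ b, b < n → ∀ c, c < 10 → ∀ d, d < 10 →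
      PySem.Int.ofChars? [ca, Nat.digitChar b, Nat.digitChar c, Nat.digitChar d]
        = some ((base + b * 100 + c * 10 + d : Nat) : Int) := by
  intro n
  induction n with
  | zero => intro _ b hb; omega
  | succ n ih =>
      intro h b hb c hc d hd
      simp only [jpChkB, Bool.and_eq_true] at h
      rcases Nat.lt_succ_iff_lt_or_eq.mp hb with h' | h'
      · exact ih h.2 b h' c hc d hd
      · subst h'; exact jpChkC_spec ca _ _ 10 h.1 c hc d hd

theorem jpChkA_spec : ∀ n, jpChkA n = true →
    ∀ a, a < n → ∀ b, b < 10 → ∀ c, c < 10 → ∀ d, d < 10 →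
      PySem.Int.ofChars? [Nat.digitChar a, Nat.digitChar b, Nat.digitChar c, Nat.digitChar d]
        = some ((a * 1000 + b * 100 + c * 10 + d : Nat) : Int) := by
  intro n
  induction n with
  | zero => intro _ a ha; omega
  | succ n ih =>
      intro h a ha b hb c hc d hd
      simp only [jpChkA, Bool.and_eq_true] at h
      rcases Nat.lt_succ_iff_lt_or_eq.mp ha with h' | h'
      · exact ih h.2 a h' b hb c hc d hd
      · subst h'; exact jpChkB_spec _ _ 10 h.1 b hb c hc d hd

theorem jpChk3C_spec (cb cc : Char) (base : Nat) : ∀ n, jpChk3C cb cc base n = true →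
    ∀ d, d < n → PySem.Int.ofChars? [cb, cc, Nat.digitChar d] = some ((base + d : Nat) : Int) := by
  intro n
  induction n with
  | zero => intro _ d hd; omega
  | succ n ih =>
      intro h d hd
      simp only [jpChk3C, Bool.and_eq_true, beq_iff_eq] at h
      rcases Nat.lt_succ_iff_lt_or_eq.mp hd with h' | h'
      · exact ih (by simpa [jpChk3C] using h.2) d h'
      · subst h'; exact h.1

theorem jpChk3B_spec (cb : Char) (base : Nat) : ∀ n, jpChk3B cb base n = true →
    ∀ c, c < n → ∀ d, d < 10 →
      PySem.Int.ofChars? [cb, Nat.digitChar c, Nat.digitChar d] = some ((base + c * 10 + d : Nat) : Int) := by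
  intro n
  induction n with
  | zero => intro _ c hc; omega
  | succ n ih =>
      intro h c hc d hd
      simp only [jpChk3B, Bool.and_eq_true] at h
      rcases Nat.lt_succ_iff_lt_or_eq.mp hc with h' | h'
      · exact ih h.2 c h' d hd
      · subst h'; exact jpChk3C_spec cb _ _ 10 h.1 d hd

theorem jpChk3A_spec : ∀ n, jpChk3A n = true →
    ∀ b, b < n → ∀ c, c < 10 → ∀ d, d < 10 →
      PySem.Int.ofChars? [Nat.digitChar b, Nat.digitChar c, Nat.digitChar d]
        = some ((b * 100 + c * 10 + d : Nat) : Int) := by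
  intro n
  induction n with
  | zero => intro _ b hb; omega
  | succ n ih =>
      intro h b hb c hc d hd
      simp only [jpChk3A, Bool.and_eq_true] at h
      rcases Nat.lt_succ_iff_lt_or_eq.mp hb with h' | h'
      · exact ih h.2 b h' c hc d hd
      · subst h'; exact jpChk3B_spec _ _ 10 h.1 c hc d hd

theorem jpChk2B_spec (cb : Char) (base : Nat) : ∀ n, jpChk2B cb base n = true →
    ∀ d, d < n → PySem.Int.ofChars? [cb, Nat.digitChar d] = some ((base + d : Nat) : Int) := by
  intro n
  induction n with
  | zero => intro _ d hd; omega
  | succ n ih =>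
      intro h d hd
      simp only [jpChk2B, Bool.and_eq_true, beq_iff_eq] at h
      rcases Nat.lt_succ_iff_lt_or_eq.mp hd with h' | h'
      · exact ih (by simpa [jpChk2B] using h.2) d h'
      · subst h'; exact h.1

theorem jpChk2A_spec : ∀ n, jpChk2A n = true →
    ∀ c, c < n → ∀ d, d < 10 →
      PySem.Int.ofChars? [Nat.digitChar c, Nat.digitChar d] = some ((c * 10 + d : Nat) : Int) := by
  intro n
  induction n with
  | zero => intro _ c hc; omega
  | succ n ih =>
      intro h c hc d hd
      simp only [jpChk2A, Bool.and_eq_true] at h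
      rcases Nat.lt_succ_iff_lt_or_eq.mp hc with h' | h'
      · exact ih h.2 c h' d hd
      · subst h'; exact jpChk2B_spec _ _ 10 h.1 d hd

theorem jpChk1_spec : ∀ n, jpChk1 n = true →
    ∀ d, d < n → PySem.Int.ofChars? [Nat.digitChar d] = some ((d : Nat) : Int) := by
  intro n
  induction n with
  | zero => intro _ d hd; omega
  | succ n ih =>
      intro h d hd
      simp only [jpChk1, Bool.and_eq_true, beq_iff_eq] at h
      rcases Nat.lt_succ_iff_lt_or_eq.mp hd with h' | h'
      · exact ih (by simpa [jpChk1] using h.2) d h'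
      · subst h'; exact h.1

theorem jpParse_pad1 {k : Nat} (hk : k < 10) :
    PySem.Int.ofChars? (jpPad1 k) = some (k : Int) := by
  have h := jpChk1_spec 10 jpChk1_true (k % 10) (by omega)
  unfold jpPad1
  rw [h, show k % 10 = k by omega]

theorem jpParse_pad2 {k : Nat} (hk : k < 100) :
    PySem.Int.ofChars? (jpPad2 k) = some (k : Int) := by
  have h := jpChk2A_spec 10 jpChk2A_true (k / 10 % 10) (by omega) (k % 10) (by omega)
  unfold jpPad2
  rw [h, show k / 10 % 10 * 10 + k % 10 = k by omega]

theorem jpParse_pad3 {k : Nat} (hk : k < 1000) :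
    PySem.Int.ofChars? (jpPad3 k) = some (k : Int) := by
  have h := jpChk3A_spec 10 jpChk3A_true (k / 100 % 10) (by omega) (k / 10 % 10) (by omega) (k % 10) (by omega)
  unfold jpPad3
  rw [h, show k / 100 % 10 * 100 + k / 10 % 10 * 10 + k % 10 = k by omega]

theorem jpParse_pad4 {k : Nat} (hk : k < 10000) :
    PySem.Int.ofChars? (jpPad4 k) = some (k : Int) := by
  have h := jpChkA_spec 10 jpChkA_true (k / 1000 % 10) (by omega) (k / 100 % 10) (by omega)
    (k / 10 % 10) (by omega) (k % 10) (by omega)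
  unfold jpPad4
  rw [h, show k / 1000 % 10 * 1000 + k / 100 % 10 * 100 + k / 10 % 10 * 10 + k % 10 = k by omega]

-- jpRep agrees with Nat.toDigits 10
theorem jpRep_toDigitsCore (f : Nat) : ∀ (n : Nat) (ds : List Char), n < 10 ^ (f + 1) →
    Nat.toDigitsCore 10 (f + 1) n ds = jpRep n ++ ds := by
  induction f with
  | zero =>
      intro n ds hn
      have hn' : n < 10 := by simpa using hn
      have h0 : n / 10 = 0 := Nat.div_eq_of_lt hn'
      rw [Nat.toDigitsCore]
      simp [h0, jpRep, hn', Nat.mod_eq_of_lt hn']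
  | succ f ih =>
      intro n ds hn
      by_cases h : n / 10 = 0
      · have hlt : n < 10 := by omega
        rw [Nat.toDigitsCore]
        simp [h, jpRep, hlt, Nat.mod_eq_of_lt hlt]
      · have h10 : 10 ≤ n := by omega
        have hdiv : n / 10 < 10 ^ (f + 1) := by
          rw [Nat.div_lt_iff_lt_mul (by omega)]
          calc n < 10 ^ (f + 2) := hn
            _ = 10 ^ (f + 1) * 10 := by ring
        have hstep : Nat.toDigitsCore 10 (f + 1 + 1) n ds
            = Nat.toDigitsCore 10 (f + 1) (n / 10) (Nat.digitChar (n % 10) :: ds) := by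
          rw [Nat.toDigitsCore]
          simp [h]
        rw [hstep, ih (n / 10) _ hdiv]
        conv_rhs => rw [jpRep]
        simp [Nat.not_lt.mpr h10]

theorem jpRep_toDigits (n : Nat) : Nat.toDigits 10 n = jpRep n := by
  have h : n < 10 ^ (n + 1) := by
    calc n < 2 ^ n := Nat.lt_two_pow_self
      _ ≤ 10 ^ n := Nat.pow_le_pow_left (by omega) n
      _ ≤ 10 ^ (n + 1) := Nat.pow_le_pow_right (by omega) (by omega)
  simpa using jpRep_toDigitsCore n n [] h

theorem jpRep_step {n : Nat} (h : 10 ≤ n) :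
    jpRep n = jpRep (n / 10) ++ [Nat.digitChar (n % 10)] := by
  rw [jpRep]; simp [Nat.not_lt.mpr h]

theorem jpRep_pad1 {m : Nat} (h : m < 10) : jpRep m = jpPad1 m := by
  rw [jpRep]; simp [h, jpPad1, Nat.mod_eq_of_lt h]

theorem jpRep_pad2 {m : Nat} (h1 : 10 ≤ m) (h2 : m < 100) : jpRep m = jpPad2 m := by
  rw [jpRep_step h1, jpRep_pad1 (by omega)]
  have e : m / 10 % 10 = m / 10 := by omega
  simp [jpPad1, jpPad2, e]

theorem jpRep_pad3 {m : Nat} (h1 : 100 ≤ m) (h2 : m < 1000) : jpRep m = jpPad3 m := by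
  rw [jpRep_step (by omega), jpRep_pad2 (by omega) (by omega)]
  have e1 : m / 10 / 10 % 10 = m / 100 % 10 := by omega
  simp [jpPad2, jpPad3, e1]

theorem jpRep_pad4 {m : Nat} (h1 : 1000 ≤ m) (h2 : m < 10000) : jpRep m = jpPad4 m := by
  rw [jpRep_step (by omega), jpRep_pad3 (by omega) (by omega)]
  have e1 : m / 10 / 100 % 10 = m / 1000 % 10 := by omega
  have e2 : m / 10 / 10 % 10 = m / 100 % 10 := by omega
  simp [jpPad3, jpPad4, e1, e2]

theorem jpRep_split {m : Nat} (h : 10000 ≤ m) :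
    jpRep m = jpRep (m / 10000) ++ jpPad4 (m % 10000) := by
  rw [jpRep_step (by omega), jpRep_step (show 10 ≤ m / 10 by omega),
      jpRep_step (show 10 ≤ m / 10 / 10 by omega), jpRep_step (show 10 ≤ m / 10 / 10 / 10 by omega)]
  rw [show m / 10 / 10 / 10 / 10 = m / 10000 by omega]
  rw [show m / 10 / 10 / 10 % 10 = m % 10000 / 1000 % 10 by omega]
  rw [show m / 10 / 10 % 10 = m % 10000 / 100 % 10 by omega]
  rw [show m / 10 % 10 = m % 10000 / 10 % 10 by omega]
  rw [show m % 10 = m % 10000 % 10 by omega]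
  simp [jpPad4, List.append_assoc]

theorem jpRep_parse {m : Nat} (h0 : 0 < m) (h : m < 10000) :
    PySem.Int.ofChars? (jpRep m) = some (m : Int) := by
  by_cases c1 : m < 10
  · rw [jpRep_pad1 c1]; exact jpParse_pad1 c1
  · by_cases c2 : m < 100
    · rw [jpRep_pad2 (by omega) c2]; exact jpParse_pad2 c2
    · by_cases c3 : m < 1000
      · rw [jpRep_pad3 (by omega) c3]; exact jpParse_pad3 c3
      · rw [jpRep_pad4 (by omega) h]; exact jpParse_pad4 h

theorem jpRep_len_le {m : Nat} (h : m < 10000) : (jpRep m).length ≤ 4 := by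
  by_cases c1 : m < 10
  · rw [jpRep_pad1 c1]; simp [jpPad1]
  · by_cases c2 : m < 100
    · rw [jpRep_pad2 (by omega) c2]; simp [jpPad2]
    · by_cases c3 : m < 1000
      · rw [jpRep_pad3 (by omega) c3]; simp [jpPad3]
      · rw [jpRep_pad4 (by omega) h]; simp [jpPad4]

theorem jpRep_ne_nil (m : Nat) : jpRep m ≠ [] := by
  rw [jpRep]; split <;> simp

-- ===== the A-side loop computes jpRender =====
theorem jpALoop_render (m : Nat) (h0 : 0 < m) : ∀ (res : List String) (idx : Nat),
    jpALoop (jpRep m) res idx = jpRender m idx ++ res := by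
  induction m using Nat.strong_induction_on with
  | _ m ih =>
    intro res idx
    rw [jpALoop]
    simp only [jpRep_ne_nil m, dite_false]
    rw [PySem.List.slice_from_neg_ofNat (jpRep m) 4 (by omega),
        PySem.List.slice_to_neg_ofNat (jpRep m) 4 (by omega)]
    by_cases hm : m < 10000
    · -- base case: the whole remaining string is the single section
      have hlen : (jpRep m).length - 4 = 0 := by have := jpRep_len_le hm; omega
      rw [hlen]
      simp only [List.drop_zero, List.take_zero]
      rw [jpRep_parse h0 hm]
      have hne : (m : Int) ≠ 0 := by omega
      simp only [Option.getD_some, hne, ne_eq, not_false_eq_true, if_true]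
      rw [jpALoop]
      simp only [dite_true]
      rw [jpRender_pos h0, Nat.div_eq_of_lt hm, jpRender_zero,
          Nat.mod_eq_of_lt hm]
      have hmne : m ≠ 0 := by omega
      rw [if_pos hmne]
      simp [PySem.List.pyGetD_natCast]
    · -- inductive case: the last four characters are the next section
      have hs := jpRep_split (show 10000 ≤ m by omega)
      have hq0 : 0 < m / 10000 := by omega
      have hqlt : m / 10000 < m := Nat.div_lt_self (by omega) (by omega)
      have hr : m % 10000 < 10000 := Nat.mod_lt _ (by omega)
      have hlen4 : (jpRep m).length - 4 = (jpRep (m / 10000)).length := by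
        rw [hs]; simp [jpPad4]
      rw [hlen4]
      conv_lhs => rw [hs]
      rw [List.drop_left, List.take_left]
      rw [jpParse_pad4 hr]
      simp only [Option.getD_some]
      rw [ih (m / 10000) hqlt hq0]
      rw [jpRender_pos h0]
      by_cases hz : m % 10000 = 0
      · have hzi : ((m % 10000 : Nat) : Int) = 0 := by omega
        rw [hzi]
        simp [hz]
      · have hzi : ((m % 10000 : Nat) : Int) ≠ 0 := by omega
        rw [if_pos hzi, if_pos hz]
        simp [PySem.List.pyGetD_natCast]

-- ===== the B-side loops compute jpSecs and jpRender =====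
def jpSecsI (m : Nat) : List Int := (jpSecs m).map (fun k => Int.ofNat k)

theorem jpSecsI_zero : jpSecsI 0 = [] := by
  unfold jpSecsI; rw [jpSecs]; simp

theorem jpSecsI_cons {m : Nat} (h : 0 < m) :
    jpSecsI m = ((m % 10000 : Nat) : Int) :: jpSecsI (m / 10000) := by
  unfold jpSecsI
  rw [jpSecs_cons h]
  simp

theorem jpSecsI_length (m : Nat) : (jpSecsI m).length = (jpSecs m).length := by
  unfold jpSecsI; simp

theorem jpBSections_secs (m : Nat) : ∀ (acc : List Int),
    jpBSections (m : Int) acc = acc ++ jpSecsI m := by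
  induction m using Nat.strong_induction_on with
  | _ m ih =>
    intro acc
    rw [jpBSections]
    by_cases h0 : m = 0
    · subst h0
      simp only [Nat.cast_zero, lt_irrefl, dite_false]
      rw [jpSecsI_zero]
      simp
    · have hpos : (0:Int) < (m:Int) := by omega
      simp only [hpos, dite_true]
      have hdiv : PySem.Int.floordiv (m : Int) 10000 = ((m / 10000 : Nat) : Int) := by
        rw [PySem.Int.floordiv_eq_ediv_of_pos (by omega)]
        omega
      have hmod : PySem.Int.mod (m : Int) 10000 = ((m % 10000 : Nat) : Int) := by
        rw [PySem.Int.mod_eq_emod_of_pos (by omega)]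
        omega
      rw [hdiv, hmod, ih (m / 10000) (Nat.div_lt_self (by omega) (by omega))]
      conv_rhs => rw [jpSecsI_cons (show 0 < m by omega)]
      simp

theorem jpBParts_append (xs ys : List Int) (parts : List String) (idx : Int) :
    jpBParts (xs ++ ys) parts idx
      = jpBParts ys (jpBParts xs parts idx).1 (jpBParts xs parts idx).2 := by
  induction xs generalizing parts idx with
  | nil => simp [jpBParts]
  | cons x xs ihx => simp [jpBParts, ihx]

theorem jpSecs_len_pos {m : Nat} (h : 0 < m) : 1 ≤ (jpSecs m).length := by
  rw [jpSecs_cons h]; simp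

theorem jpBParts_render (m : Nat) (h0 : 0 < m) : ∀ (acc : List String) (base : Nat),
    jpBParts (jpSecsI m).reverse acc (((jpSecs m).length - 1 + base : Nat) : Int)
      = (acc ++ jpRender m base, (base : Int) - 1) := by
  induction m using Nat.strong_induction_on with
  | _ m ih =>
    intro acc base
    rw [jpSecsI_cons h0]
    by_cases hq : m / 10000 = 0
    · -- one section: m < 10000, the section is m itself and it is nonzero
      have hm : m < 10000 := by omega
      have hmm : m % 10000 = m := Nat.mod_eq_of_lt hm
      have hlen1 : (jpSecs m).length = 1 := by rw [jpSecs_cons h0, hq, jpSecs]; simp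
      rw [hq, jpSecsI_zero, hlen1]
      simp only [List.reverse_cons, List.reverse_nil, List.nil_append]
      rw [show ((1 - 1 + base : Nat) : Int) = (base : Int) by omega]
      have hne : ((m % 10000 : Nat) : Int) ≠ 0 := by omega
      simp only [jpBParts, ne_eq, hne, not_false_eq_true, if_true]
      rw [jpRender_pos h0, hq, jpRender_zero]
      have hzz : m % 10000 ≠ 0 := by omega
      rw [if_pos hzz]
      simp [PySem.List.pyGetD_natCast, jpUnitsB, jpUnitsA]
    · -- at least two sections
      have hq0 : 0 < m / 10000 := by omega
      have hqlt : m / 10000 < m := Nat.div_lt_self (by omega) (by omega)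
      have hlq : 1 ≤ (jpSecs (m / 10000)).length := jpSecs_len_pos hq0
      have hlen : (jpSecs m).length = (jpSecs (m / 10000)).length + 1 := by
        rw [jpSecs_cons h0]; simp
      rw [hlen]
      simp only [List.reverse_cons]
      rw [show (((jpSecs (m / 10000)).length + 1 - 1 + base : Nat) : Int)
          = (((jpSecs (m / 10000)).length - 1 + (base + 1) : Nat) : Int) by omega]
      rw [jpBParts_append, ih (m / 10000) hqlt hq0 acc (base + 1)]
      rw [show ((base + 1 : Nat) : Int) - 1 = (base : Int) by omega]
      rw [jpRender_pos h0]
      by_cases hz : m % 10000 = 0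
      · have hzi : ((m % 10000 : Nat) : Int) = 0 := by omega
        rw [hzi]
        simp [jpBParts, hz]
      · have hzi : ((m % 10000 : Nat) : Int) ≠ 0 := by omega
        simp only [jpBParts, ne_eq, hzi, not_false_eq_true, if_true]
        rw [if_pos hz]
        simp [PySem.List.pyGetD_natCast, jpUnitsB, jpUnitsA, List.append_assoc]

-- ===== VERDICT (by name: the statement is the Claim_ definition above) =====
theorem number_to_japanese_units_spec : Claim_equal_number_to_japanese_units := by
  intro n _dom
  unfold Spec_number_to_japanese_units number_to_japanese_units number_to_japanese_units_alt
  by_cases h1 : n < 1000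
  · simp [h1, show n < 10000 by omega]
  · by_cases h2 : n < 10000
    · simp [h1, h2]
    · simp only [h1, h2, if_false]
      -- n ≥ 10000: work with m = n.toNat
      have hn0 : 0 ≤ n := by omega
      set m := n.toNat with hmdef
      have hnm : n = (m : Int) := (Int.toNat_of_nonneg hn0).symm
      have hm : 10000 ≤ m := by omega
      -- A's string is jpRep m
      have hchars : PySem.Int.toChars n = jpRep m := by
        unfold PySem.Int.toChars
        rw [if_neg (by omega)]
        exact jpRep_toDigits m
      rw [hchars, jpALoop_render m (by omega) [] 0]
      -- B's sections are jpSecs m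
      rw [hnm, jpBSections_secs m []]
      simp only [List.nil_append]
      have hlen : PySem.List.len (jpSecsI m) - 1
          = (((jpSecs m).length - 1 + 0 : Nat) : Int) := by
        rw [PySem.List.len_eq, jpSecsI_length]
        have hl1 : 1 ≤ (jpSecs m).length := jpSecs_len_pos (by omega)
        omega
      rw [hlen, jpBParts_render m (by omega) [] 0]
      simp
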